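-- pv_equiv track=rewrite | github.com/Fahadulhassan1/code_review_ninja | code_review/github_client.py | _find_comment_line
-- ===== SOURCE A (Python) =====
-- def _find_comment_line(line_range: str, commentable: set[int]) -> int | None:
--     """Map a finding's line range to a commentable line in the diff."""
--     if not line_range or not commentable:
--         return None
--     parts = line_range.replace(" ", "").split("-")
--     try:
--         start = int(parts[0])
--         end = int(parts[-1]) if len(parts) > 1 else start
--     except (ValueError, IndexError):
--         return None
--     # Exact match in range
--     for line in range(start, end + 1):
--         if line in commentable:
--             return line
--     # Nearby (±3 lines)
--     for offset in range(1, 4):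
--         if start - offset in commentable:
--             return start - offset
--         if end + offset in commentable:
--             return end + offset
--     return None
-- ===== SOURCE B (Python) =====
-- def _find_comment_line(line_range: str, commentable: set[int]) -> int | None:
--     """Map a finding's line range to a commentable line in the diff."""
--     if not line_range or not commentable:
--         return None
--     parts = line_range.replace(" ", "").split("-")
--     try:
--         start = int(parts[0])
--         end = int(parts[-1]) if len(parts) > 1 else start
--     except (ValueError, IndexError):
--         return None
--     # One pass over the commentable set instead of walking the whole range:
--     # the first hit of an ascending range scan is the minimum in-range element.
--     in_range = [x for x in commentable if start <= x <= end]
--     if in_range: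
--         return min(in_range)
--     # Nearby (+-3 lines), in the same priority order A checks them.
--     for cand in (start - 1, end + 1, start - 2, end + 2, start - 3, end + 3):
--         if cand in commentable:
--             return cand
--     return None
-- ===== Notes on version B (the rewrite author's own statement) =====
-- stated objective: alternative
-- what changed: Instead of A's walk over every line of the parsed range (first hit wins), B makes one pass over the commentable set and returns the minimum in-range element (equal because an ascending range scan returns the smallest member), then checks the same six nearby candidates in A's priority order.
import Mathlib
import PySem

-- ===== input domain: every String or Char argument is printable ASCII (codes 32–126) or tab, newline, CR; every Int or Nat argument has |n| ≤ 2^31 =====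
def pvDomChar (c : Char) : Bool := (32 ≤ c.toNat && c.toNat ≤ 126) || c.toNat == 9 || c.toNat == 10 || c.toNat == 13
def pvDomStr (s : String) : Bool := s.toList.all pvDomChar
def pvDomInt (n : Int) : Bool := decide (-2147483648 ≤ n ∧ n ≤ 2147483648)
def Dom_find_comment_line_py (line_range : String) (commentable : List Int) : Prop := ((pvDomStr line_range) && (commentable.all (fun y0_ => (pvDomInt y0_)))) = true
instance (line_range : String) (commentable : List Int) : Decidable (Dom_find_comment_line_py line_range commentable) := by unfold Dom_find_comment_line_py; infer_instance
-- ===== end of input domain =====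

-- B replaces A's walk over every line of the parsed range by a single pass over the
-- commentable set (minimum in-range element); return value only, no mutation.

-- Parsing step, identical lines in A and B:
-- parts = line_range.replace(" ", "").split("-"); start = int(parts[0]); end = int(parts[-1]) if len(parts) > 1 else start
-- (the separator "-" is nonempty, so split? always returns some; parts is nonempty, so parts[0]/parts[-1] never raise)
def pvParseRange (line_range : String) : Option (Int × Int) :=
  let parts := (PySem.Str.split? (PySem.Str.replace line_range " " "") "-").getD []
  match PySem.Int.ofStr? (parts.headD "") with
  | none => none
  | some start =>
    match (if 1 < parts.length then PySem.Int.ofStr? (parts.getLastD "") else some start) with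
    | none => none
    | some e => some (start, e)

-- ===== PORT A =====
def find_comment_line_py (line_range : String) (commentable : List Int) : Option Int :=
  if line_range == "" || commentable.isEmpty then none
  else
    match pvParseRange line_range with
    | none => none
    | some (start, e) =>
      -- for line in range(start, end+1): if line in commentable: return line
      match (PySem.List.pyRange start (e + 1) 1).find? (fun l => commentable.contains l) with
      | some l => some l
      | none =>
        -- for offset in range(1, 4): check start-offset then end+offset
        (PySem.List.pyRange 1 4 1).foldl (fun acc off =>
          match acc with
          | some r => some r
          | none =>
            if commentable.contains (start - off) then some (start - off)
            else if commentable.contains (e + off) then some (e + off)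
            else none) none

-- ===== PORT B =====
def find_comment_line_py_alt (line_range : String) (commentable : List Int) : Option Int :=
  if line_range == "" || commentable.isEmpty then none
  else
    match pvParseRange line_range with
    | none => none
    | some (start, e) =>
      -- in_range = [x for x in commentable if start <= x <= end]; min(in_range) if nonempty
      match PySem.List.min? (commentable.filter (fun x => decide (start ≤ x) && decide (x ≤ e))) (fun x => x) with
      | some m => some m
      | none =>
        -- for cand in (start-1, end+1, start-2, end+2, start-3, end+3): first hit
        [start - 1, e + 1, start - 2, e + 2, start - 3, e + 3].find? (fun c => commentable.contains c)

-- ===== PRECONDITION & SPEC =====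
def Spec_find_comment_line_py (line_range : String) (commentable : List Int) (out : Option Int) : Prop := out = find_comment_line_py_alt line_range commentable
instance (line_range : String) (commentable : List Int) (out : Option Int) : Decidable (Spec_find_comment_line_py line_range commentable out) := by unfold Spec_find_comment_line_py; infer_instance

-- ===== CLAIM (what is proved, stated in full; the proofs are below) =====
def Claim_equal_find_comment_line_py : Prop := ∀ (line_range : String) (commentable : List Int), Dom_find_comment_line_py line_range commentable → Spec_find_comment_line_py line_range commentable (find_comment_line_py line_range commentable)

-- ===== LEMMAS AND PROOFS =====

-- min? with identity key returns the minimum value.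
theorem pv_min?_eq_some_of (l : List Int) (m : Int) (hm : m ∈ l) (hle : ∀ y ∈ l, m ≤ y) :
    PySem.List.min? l (fun x => x) = some m := by
  cases h : PySem.List.min? l (fun x => x) with
  | none =>
    rw [PySem.List.min?_eq_none_iff] at h
    simp [h] at hm
  | some v =>
    have hv := PySem.List.min?_mem h
    have hmin := PySem.List.min?_isMin h
    have h1 : v ≤ m := hmin m hm
    have h2 : m ≤ v := hle v hv
    have hvm : v = m := le_antisymm h1 h2
    rw [hvm]

-- The first hit of an ascending range scan is the minimum in-range element of S.
theorem pv_range_find_eq_min (S : List Int) (n : Nat) :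
    ∀ (start e : Int), (e + 1 - start).toNat = n →
      (PySem.List.pyRange start (e + 1) 1).find? (fun l => S.contains l)
        = PySem.List.min? (S.filter (fun x => decide (start ≤ x) && decide (x ≤ e))) (fun x => x) := by
  induction n with
  | zero =>
    intro start e h
    rw [PySem.List.pyRange_one_eq_nil (by omega)]
    have hf : S.filter (fun x => decide (start ≤ x) && decide (x ≤ e)) = [] := by
      apply List.filter_eq_nil_iff.mpr
      intro x hx
      simp only [Bool.and_eq_true, decide_eq_true_eq, not_and, not_le]
      intro h1
      omega
    rw [hf]
    rfl
  | succ k ih =>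
    intro start e h
    rw [PySem.List.pyRange_one_cons (by omega)]
    cases hc : S.contains start with
    | true =>
      rw [List.find?_cons_of_pos hc]
      have hmem : start ∈ S := by simpa using hc
      symm
      apply pv_min?_eq_some_of
      · refine List.mem_filter.mpr ⟨hmem, ?_⟩
        simp only [Bool.and_eq_true, decide_eq_true_eq]
        omega
      · intro y hy
        simp only [List.mem_filter, Bool.and_eq_true, decide_eq_true_eq] at hy
        omega
    | false =>
      have hnm : start ∉ S := by simpa using hc
      rw [List.find?_cons_of_neg (by simp [hnm])]
      rw [ih (start + 1) e (by omega)]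
      congr 1
      apply List.filter_congr
      intro y hy
      have hne : y ≠ start := fun hEq => hnm (hEq ▸ hy)
      congr 1
      exact decide_eq_decide.mpr (by omega)

-- A's unrolled offset loop equals B's scan of the six candidates.
theorem pv_nearby_eq (S : List Int) (s e : Int) :
    (PySem.List.pyRange 1 4 1).foldl (fun acc off =>
        match acc with
        | some r => some r
        | none =>
          if S.contains (s - off) then some (s - off)
          else if S.contains (e + off) then some (e + off)
          else none) none
      = [s - 1, e + 1, s - 2, e + 2, s - 3, e + 3].find? (fun c => S.contains c) := by
  have h134 : PySem.List.pyRange 1 4 1 = [1, 2, 3] := by decide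
  rw [h134]
  by_cases h1 : s - 1 ∈ S <;> by_cases h2 : e + 1 ∈ S <;>
    by_cases h3 : s - 2 ∈ S <;> by_cases h4 : e + 2 ∈ S <;>
    by_cases h5 : s - 3 ∈ S <;> by_cases h6 : e + 3 ∈ S <;>
    simp [List.foldl_cons, List.foldl_nil, h1, h2, h3, h4, h5, h6]

-- ===== VERDICT (by name: the statement is the Claim_ definition above) =====
theorem find_comment_line_py_spec : Claim_equal_find_comment_line_py := by
  unfold Claim_equal_find_comment_line_py Spec_find_comment_line_py
  intro line_range commentable _
  unfold find_comment_line_py find_comment_line_py_alt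
  cases h0 : (line_range == "" || commentable.isEmpty) with
  | true => rw [if_pos rfl, if_pos rfl]
  | false =>
    rw [if_neg Bool.false_ne_true, if_neg Bool.false_ne_true]
    cases hp : pvParseRange line_range with
    | none => rfl
    | some se =>
      obtain ⟨start, e⟩ := se
      dsimp only []
      rw [pv_range_find_eq_min commentable (e + 1 - start).toNat start e rfl]
      cases hm : PySem.List.min? (commentable.filter (fun x => decide (start ≤ x) && decide (x ≤ e))) (fun x => x) with
      | some m => rfl
      | none => exact pv_nearby_eq commentable start e
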